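-- pv_equiv track=rewrite | github.com/cutehammond772/problem-solving-archive | 프로그래머스/2/42626. 더 맵게/더 맵게.py | solution
-- ===== SOURCE A (Python) =====
-- from heapq import heappush, heappop, heapify
--
-- def solution(scoville, K):
--     answer = 0
--     heapify(scoville)
--
--     while len(scoville) > 1:
--         first, second = heappop(scoville), heappop(scoville)
--
--         if first >= K:
--             return answer
--
--         heappush(scoville, first + second * 2)
--         answer += 1
--
--     if scoville[0] < K:
--         return -1
--
--     return answer
-- ===== SOURCE B (Python) =====
-- def solution(scoville, K):
--     # One linear scan per round finds BOTH minima of an unsorted pool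
--     # (no heap, no sorting, no maintained order); return value only
--     # (A heapifies its argument in place; B leaves it untouched).
--     pool = list(scoville)
--     answer = 0
--     while len(pool) > 1:
--         m1 = m2 = None
--         for v in pool:
--             if m1 is None or v < m1:
--                 m1, m2 = v, m1
--             elif m2 is None or v < m2:
--                 m2 = v
--         if m1 >= K:
--             return answer
--         pool.remove(m1)
--         pool.remove(m2)
--         pool.append(m1 + 2 * m2)
--         answer += 1
--     if pool[0] < K:
--         return -1
--     return answer
-- ===== Notes on version B (the rewrite author's own statement) =====
-- stated objective: alternative
-- what changed: Replaces the binary heap (heapify/heappop/heappush) by an unsorted pool from which each round's two minima are found together by a single linear selection scan and removed by value; no ordering is ever built or maintained.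
import Mathlib
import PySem

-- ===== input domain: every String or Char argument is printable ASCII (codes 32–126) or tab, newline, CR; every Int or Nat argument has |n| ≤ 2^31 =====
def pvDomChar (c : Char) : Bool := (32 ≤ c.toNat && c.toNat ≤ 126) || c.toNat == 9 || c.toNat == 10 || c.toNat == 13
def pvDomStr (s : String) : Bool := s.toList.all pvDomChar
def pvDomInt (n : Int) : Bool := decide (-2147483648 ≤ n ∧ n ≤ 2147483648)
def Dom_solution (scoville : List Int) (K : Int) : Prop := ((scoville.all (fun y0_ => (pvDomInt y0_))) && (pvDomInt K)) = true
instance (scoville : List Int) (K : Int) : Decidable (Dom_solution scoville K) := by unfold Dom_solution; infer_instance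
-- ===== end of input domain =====

-- B replaces A's binary heap by an unsorted pool scanned once per round for both minima,
-- which are then removed by value ('alternative', not faster). Return value only:
-- A heapifies its argument in place, B does not mutate it.

-- ===== PORT A =====
-- heapq is modelled by its observable contract on a multiset of ints: heappop returns
-- the minimum element (exact: a min-heap's pop is the minimum; the internal array layout
-- never affects any popped value), heappush adds an element.
def popMin (xs : List Int) : Int × List Int :=
  match PySem.List.min? xs (fun x => x) with
  | none => (0, xs)      -- unreachable: only called on nonempty lists
  | some m => (m, xs.erase m)

theorem popMin_snd_length (xs : List Int) (h : xs ≠ []) :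
    (popMin xs).2.length = xs.length - 1 := by
  unfold popMin
  cases hm : PySem.List.min? xs (fun x => x) with
  | none => exact absurd ((PySem.List.min?_eq_none_iff xs _).mp hm) h
  | some m => simp [List.length_erase_of_mem (PySem.List.min?_mem hm)]

def solLoopA (K : Int) (xs : List Int) (ans : Int) : Int :=
  if h : 1 < xs.length then
    -- first, second = heappop(scoville), heappop(scoville)
    if (popMin xs).1 ≥ K then ans
    else solLoopA K ((popMin (popMin xs).2).2 ++ [(popMin xs).1 + (popMin (popMin xs).2).1 * 2]) (ans + 1)
  else
    match PySem.List.pyGet? xs 0 with   -- scoville[0]: IndexError (none) on the empty list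
    | none => 0                          -- unreachable under Pre_solution
    | some v => if v < K then -1 else ans
termination_by xs.length
decreasing_by
  have h1 : xs ≠ [] := by intro hx; simp [hx] at h
  have e1 := popMin_snd_length xs h1
  have h2 : (popMin xs).2 ≠ [] := by
    intro hx; rw [hx] at e1; simp at e1; omega
  have e2 := popMin_snd_length _ h2
  simp only [List.length_append, List.length_cons, List.length_nil]
  omega

def solution (scoville : List Int) (K : Int) : Int := solLoopA K scoville 0

-- ===== PORT B =====
-- one step of the selection scan: 'if m1 is None or v < m1: m1, m2 = v, m1
--                                  elif m2 is None or v < m2: m2 = v'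
def upd (st : Option Int × Option Int) (v : Int) : Option Int × Option Int :=
  match st with
  | (none, _) => (some v, none)          -- m2 := m1 (= None); m1 := v
  | (some m1, o2) =>
    if v < m1 then (some v, some m1)
    else match o2 with
      | none => (some m1, some v)
      | some m2 => if v < m2 then (some m1, some v) else (some m1, some m2)

-- 'for v in pool: …' over the unsorted pool
def twoScan : List Int → Option Int × Option Int → Option Int × Option Int
  | [], st => st
  | v :: vs, st => twoScan vs (upd st v)

theorem remove?_some_length (xs r : List Int) (v : Int)
    (h : PySem.List.remove? xs v = some r) : r.length + 1 = xs.length := by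
  have hv : v ∈ xs := by
    by_contra hv
    rw [(PySem.List.remove?_eq_none_iff xs v).mpr hv] at h
    simp at h
  rw [PySem.List.remove?_eq_some_erase xs v hv] at h
  cases h
  rw [List.length_erase_of_mem hv]
  have := List.length_pos_of_mem hv
  omega

def solLoopB (K : Int) (pool : List Int) (ans : Int) : Int :=
  if h : 1 < pool.length then
    match twoScan pool (none, none) with
    | (some m1, some m2) =>
      if m1 ≥ K then ans
      else
        -- pool.remove(m1); pool.remove(m2): ValueError (none) if absent — unreachable here
        match h1 : PySem.List.remove? pool m1 with
        | none => 0
        | some p1 =>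
          match h2 : PySem.List.remove? p1 m2 with
          | none => 0
          | some p2 => solLoopB K (p2 ++ [m1 + 2 * m2]) (ans + 1)
    | _ => 0                             -- unreachable: a pool of length ≥ 2 yields two minima
  else
    match PySem.List.pyGet? pool 0 with  -- pool[0]: IndexError (none) on the empty list
    | none => 0                          -- unreachable under Pre_solution
    | some v => if v < K then -1 else ans
termination_by pool.length
decreasing_by
  have e1 := remove?_some_length _ _ _ h1
  have e2 := remove?_some_length _ _ _ h2
  simp only [List.length_append, List.length_cons, List.length_nil]
  omega

def solution_alt (scoville : List Int) (K : Int) : Int := solLoopB K scoville 0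

-- ===== PRECONDITION & SPEC =====
-- Pre_ excludes only the empty list, on which both Pythons raise IndexError (scoville[0] / pool[0]).
def Pre_solution (scoville : List Int) (K : Int) : Prop := scoville ≠ []
instance (scoville : List Int) (K : Int) : Decidable (Pre_solution scoville K) := by unfold Pre_solution; infer_instance
def pvWitness_solution : List Int × Int := ([1, 2, 3, 9, 10, 12], 7)
def Spec_solution (scoville : List Int) (K : Int) (out : Int) : Prop := out = solution_alt scoville K
instance (scoville : List Int) (K : Int) (out : Int) : Decidable (Spec_solution scoville K out) := by unfold Spec_solution; infer_instance

-- ===== CLAIM (what is proved, stated in full; the proofs are below) =====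
def Claim_equal_solution : Prop := ∀ (scoville : List Int) (K : Int), Dom_solution scoville K → Pre_solution scoville K → Spec_solution scoville K (solution scoville K)

-- ===== LEMMAS AND PROOFS =====

-- the first and second order statistics (by value) of a list
def stat2 (l : List Int) : Option Int × Option Int :=
  match PySem.List.min? l (fun x => x) with
  | none => (none, none)
  | some m => (some m, PySem.List.min? (l.erase m) (fun x => x))

theorem stat2_eq (l : List Int) (m : Int) (hm : PySem.List.min? l (fun x => x) = some m) :
    stat2 l = (some m, PySem.List.min? (l.erase m) (fun x => x)) := by
  unfold stat2; rw [hm]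

theorem minid_perm (l l' : List Int) (hp : l.Perm l') :
    PySem.List.min? l (fun x => x) = PySem.List.min? l' (fun x => x) := by
  cases hm : PySem.List.min? l (fun x => x) with
  | none =>
    have hl : l = [] := (PySem.List.min?_eq_none_iff l _).mp hm
    subst hl
    have hl' : l' = [] := List.nil_perm.mp hp
    subst hl'
    rfl
  | some m =>
    cases hm' : PySem.List.min? l' (fun x => x) with
    | none =>
      have hl' : l' = [] := (PySem.List.min?_eq_none_iff l' _).mp hm'
      subst hl'
      have hl : l = [] := hp.eq_nil
      subst hl
      rw [(PySem.List.min?_eq_none_iff ([] : List Int) (fun x => x)).mpr rfl] at hm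
      simp at hm
    | some m' =>
      have h1 : m ≤ m' := PySem.List.min?_isMin hm m' (hp.mem_iff.mpr (PySem.List.min?_mem hm'))
      have h2 : m' ≤ m := PySem.List.min?_isMin hm' m (hp.mem_iff.mp (PySem.List.min?_mem hm))
      rw [le_antisymm h1 h2]

theorem minid_cons_skip (c : Int) (l : List Int) (e : Int) (he : e ∈ l) (hec : e ≤ c) :
    PySem.List.min? (c :: l) (fun x => x) = PySem.List.min? l (fun x => x) := by
  cases hm : PySem.List.min? l (fun x => x) with
  | none =>
    have hl : l = [] := (PySem.List.min?_eq_none_iff l _).mp hm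
    subst hl; cases he
  | some w =>
    cases hm' : PySem.List.min? (c :: l) (fun x => x) with
    | none => cases (List.cons_ne_nil c l) ((PySem.List.min?_eq_none_iff _ _).mp hm')
    | some w' =>
      have h1 : w' ≤ w := PySem.List.min?_isMin hm' w (List.mem_cons_of_mem c (PySem.List.min?_mem hm))
      have h2 : w ≤ w' := by
        rcases List.mem_cons.mp (PySem.List.min?_mem hm') with h | h
        · subst h; exact le_trans (PySem.List.min?_isMin hm e he) hec
        · exact PySem.List.min?_isMin hm w' h
      rw [le_antisymm h1 h2]

theorem stat2_perm (l l' : List Int) (hp : l.Perm l') : stat2 l = stat2 l' := by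
  have h := minid_perm l l' hp
  cases hm : PySem.List.min? l (fun x => x) with
  | none =>
    have hl : l = [] := (PySem.List.min?_eq_none_iff l _).mp hm
    subst hl
    have hl' : l' = [] := List.nil_perm.mp hp
    subst hl'
    rfl
  | some m =>
    have hm' : PySem.List.min? l' (fun x => x) = some m := by rw [← h, hm]
    rw [stat2_eq l m hm, stat2_eq l' m hm',
        minid_perm (l.erase m) (l'.erase m) (hp.erase m)]

-- dropping an element that dominates two elements of the rest leaves both order statistics unchanged
theorem stat2_cons_big (c a b : Int) (vs : List Int) (hac : a ≤ c) (hbc : b ≤ c) :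
    stat2 (c :: a :: b :: vs) = stat2 (a :: b :: vs) := by
  cases hm : PySem.List.min? (a :: b :: vs) (fun x => x) with
  | none => cases (List.cons_ne_nil a (b :: vs)) ((PySem.List.min?_eq_none_iff _ _).mp hm)
  | some m =>
    have hskip : PySem.List.min? (c :: a :: b :: vs) (fun x => x) = some m := by
      rw [minid_cons_skip c (a :: b :: vs) a (by simp) hac]; exact hm
    rw [stat2_eq _ _ hskip, stat2_eq _ _ hm]
    have hmm : m ∈ a :: b :: vs := PySem.List.min?_mem hm
    have hmin : ∀ y ∈ a :: b :: vs, m ≤ y := fun y hy => PySem.List.min?_isMin hm y hy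
    by_cases hcm : c = m
    · have ha : a = m := le_antisymm (hac.trans (le_of_eq hcm)) (hmin a (by simp))
      have hb : b = m := le_antisymm (hbc.trans (le_of_eq hcm)) (hmin b (by simp))
      rw [hcm, ha, hb]
      simp only [List.erase_cons_head]
      rw [minid_cons_skip m (m :: vs) m (by simp) le_rfl]
    · have he : ∃ e ∈ (a :: b :: vs).erase m, e ≤ c := by
        by_cases ham : a = m
        · subst ham
          exact ⟨b, by simp [List.erase_cons_head], hbc⟩
        · refine ⟨a, ?_, hac⟩
          rw [List.erase_cons_tail (by simp [ham])]
          simp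
      rcases he with ⟨e, he, hec⟩
      rw [List.erase_cons_tail (by simp [hcm]),
          minid_cons_skip c ((a :: b :: vs).erase m) e he hec]

theorem perm_rot3 (x y z : Int) (l : List Int) : (x :: y :: z :: l).Perm (y :: z :: x :: l) :=
  (List.Perm.swap y x (z :: l)).trans (List.Perm.cons y (List.Perm.swap z x l))

-- the scan from an ordered seed pair computes both order statistics
theorem twoScan_char (vs : List Int) : ∀ (a b : Int), a ≤ b →
    twoScan vs (some a, some b) = stat2 (a :: b :: vs) := by
  induction vs with
  | nil =>
    intro a b hab
    have hm : PySem.List.min? (a :: b :: []) (fun x => x) = some a := by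
      rw [PySem.List.min?_id_cons]
      simp [List.foldl, min_eq_left hab]
    show (some a, some b) = stat2 (a :: b :: [])
    rw [stat2_eq _ _ hm, List.erase_cons_head, PySem.List.min?_id_cons]
    rfl
  | cons v vs ih =>
    intro a b hab
    show twoScan vs (upd (some a, some b) v) = stat2 (a :: b :: v :: vs)
    have hupd : upd (some a, some b) v =
        (if v < a then ((some v : Option Int), (some a : Option Int))
         else if v < b then (some a, some v) else (some a, some b)) := rfl
    rw [hupd]
    by_cases hva : v < a
    · rw [if_pos hva, ih v a (le_of_lt hva),
          stat2_perm (a :: b :: v :: vs) (b :: v :: a :: vs) (perm_rot3 a b v vs)]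
      exact (stat2_cons_big b v a vs (le_trans (le_of_lt hva) hab) hab).symm
    · rw [if_neg hva]
      by_cases hvb : v < b
      · rw [if_pos hvb, ih a v (not_lt.mp hva),
            stat2_perm (a :: b :: v :: vs) (b :: a :: v :: vs) (List.Perm.swap b a (v :: vs))]
        exact (stat2_cons_big b a v vs hab (le_of_lt hvb)).symm
      · rw [if_neg hvb, ih a b hab,
            stat2_perm (a :: b :: v :: vs) (v :: a :: b :: vs) (perm_rot3 v a b vs).symm]
        exact (stat2_cons_big v a b vs (not_lt.mp hva) (not_lt.mp hvb)).symm

theorem loop_eq (K : Int) : ∀ (n : Nat) (xsA xsB : List Int) (ans : Int),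
    xsA.length ≤ n → xsA.Perm xsB →
    solLoopA K xsA ans = solLoopB K xsB ans := by
  intro n
  induction n with
  | zero =>
    intro xsA xsB ans hn hp
    have hx : xsA = [] := List.length_eq_zero_iff.mp (by omega)
    subst hx
    have hy : xsB = [] := List.nil_perm.mp hp
    subst hy
    unfold solLoopA solLoopB
    simp [PySem.List.pyGet?_zero]
  | succ n ih =>
    intro xsA xsB ans hn hp
    cases xsB with
    | nil =>
      have hx : xsA = [] := hp.eq_nil
      subst hx
      unfold solLoopA solLoopB
      simp [PySem.List.pyGet?_zero]
    | cons x t =>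
      cases t with
      | nil =>
        have hx : xsA = [x] := List.perm_singleton.mp hp
        subst hx
        unfold solLoopA solLoopB
        simp
      | cons y rest =>
        -- both lists have length ≥ 2
        have hlen : 1 < xsA.length := by
          have := hp.length_eq; simp at this; omega
        have hlenB : 1 < (x :: y :: rest).length := by simp
        have hAne : xsA ≠ [] := by intro hx; rw [hx] at hlen; simp at hlen
        cases hm1 : PySem.List.min? xsA (fun x => x) with
        | none => exact absurd ((PySem.List.min?_eq_none_iff _ _).mp hm1) hAne
        | some m1 =>
        have hm1mem : m1 ∈ xsA := PySem.List.min?_mem hm1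
        have hEne : xsA.erase m1 ≠ [] := by
          intro hx
          have h1 := List.length_erase_of_mem hm1mem
          rw [hx] at h1; simp at h1; omega
        cases hm2 : PySem.List.min? (xsA.erase m1) (fun x => x) with
        | none => exact absurd ((PySem.List.min?_eq_none_iff _ _).mp hm2) hEne
        | some m2 =>
        have hm2mem : m2 ∈ xsA.erase m1 := PySem.List.min?_mem hm2
        have hstat : stat2 xsA = (some m1, some m2) := by rw [stat2_eq _ _ hm1, hm2]
        -- B's scan computes the two order statistics of the (permuted) pool
        have hscan : twoScan (x :: y :: rest) (none, none) = (some m1, some m2) := by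
          show twoScan rest (upd (upd (none, none) x) y) = (some m1, some m2)
          by_cases h : y < x
          · have hu : upd (upd (none, none) x) y = (some y, some x) := by
              show (if y < x then ((some y : Option Int), (some x : Option Int))
                    else (some x, some y)) = _
              rw [if_pos h]
            rw [hu, twoScan_char rest y x (le_of_lt h),
                stat2_perm (y :: x :: rest) xsA ((List.Perm.swap x y rest).trans hp.symm)]
            exact hstat
          · have hu : upd (upd (none, none) x) y = (some x, some y) := by
              show (if y < x then ((some y : Option Int), (some x : Option Int))
                    else (some x, some y)) = _
              rw [if_neg h]
            rw [hu, twoScan_char rest x y (not_lt.mp h),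
                stat2_perm (x :: y :: rest) xsA hp.symm]
            exact hstat
        -- A's two pops
        have hpopA : popMin xsA = (m1, xsA.erase m1) := by unfold popMin; rw [hm1]
        have hpopA2 : popMin (xsA.erase m1) = (m2, (xsA.erase m1).erase m2) := by
          unfold popMin; rw [hm2]
        -- B's two removes
        have hm1memB : m1 ∈ x :: y :: rest := hp.mem_iff.mp hm1mem
        have hrem1 : PySem.List.remove? (x :: y :: rest) m1 = some ((x :: y :: rest).erase m1) :=
          PySem.List.remove?_eq_some_erase _ _ hm1memB
        have hpermE : (xsA.erase m1).Perm ((x :: y :: rest).erase m1) := hp.erase m1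
        have hm2memB : m2 ∈ (x :: y :: rest).erase m1 := hpermE.mem_iff.mp hm2mem
        have hrem2 : PySem.List.remove? ((x :: y :: rest).erase m1) m2 =
            some (((x :: y :: rest).erase m1).erase m2) :=
          PySem.List.remove?_eq_some_erase _ _ hm2memB
        rw [solLoopA, solLoopB, dif_pos hlen, dif_pos hlenB, hscan]
        simp only [hpopA, hpopA2]
        by_cases hK : m1 ≥ K
        · simp [hK]
        · rw [if_neg hK, if_neg hK]
          have hmix : m1 + m2 * 2 = m1 + 2 * m2 := by ring
          rw [hmix]
          have hlen2 : ((xsA.erase m1).erase m2 ++ [m1 + 2 * m2]).length ≤ n := by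
            have e1 : (xsA.erase m1).length = xsA.length - 1 := List.length_erase_of_mem hm1mem
            have e2 : ((xsA.erase m1).erase m2).length = (xsA.erase m1).length - 1 :=
              List.length_erase_of_mem hm2mem
            have hm0 : 0 < (xsA.erase m1).length := List.length_pos_of_mem hm2mem
            simp only [List.length_append, List.length_cons, List.length_nil]
            omega
          have hperm2 : ((xsA.erase m1).erase m2 ++ [m1 + 2 * m2]).Perm
              (((x :: y :: rest).erase m1).erase m2 ++ [m1 + 2 * m2]) :=
            (hpermE.erase m2).append_right [m1 + 2 * m2]
          split
          · rename_i heq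
            rw [hrem1] at heq
            simp at heq
          · rename_i p1 heq
            rw [hrem1] at heq
            injection heq with heq
            subst heq
            split
            · rename_i heq2
              rw [hrem2] at heq2
              simp at heq2
            · rename_i p2 heq2
              rw [hrem2] at heq2
              injection heq2 with heq2
              subst heq2
              exact ih _ _ _ hlen2 hperm2

-- ===== VERDICT (by name: the statement is the Claim_ definition above) =====
theorem solution_spec : Claim_equal_solution := by
  intro scoville K _ _
  unfold Spec_solution solution solution_alt
  exact loop_eq K scoville.length scoville scoville 0 (le_refl _) (List.Perm.refl _)
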